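-- pv_equiv track=rewrite | github.com/liamrankine22/schoolwork | Year-Three/Comment Removal/dcom.rm.py | find_valid_substring
-- ===== SOURCE A (Python) =====
-- def find_valid_substring(code):
--     length = len(code)
--     # Iterate through each character in the code
--     for i in range(length):
--         if code[i].isdigit():
--             if i + 10 <= length: # Ensure we have enough characters for a 10-char substring
--                 substring = code[i:i+10] # Extract the substring of length 10
--                 if validate_date_format(substring): # Validate the format of the substring
--                     return True
--
--     return False
--
-- def validate_date_format(substring):
--     # Check if the length of the substring is exactly 10 character
--     if len(substring) != 10:
--         return False
--
--     # Ensure that the third and sixth characters are '/'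
--     if substring[2] != '/' or substring[5] != '/':
--         return False
--
--     # Check that all other characters are digits
--     for i in range(10):
--         if i == 2 or i == 5: # Skip the positions for the '/'
--             continue
--         elif not substring[i].isdigit(): # Ensure the character is a digit
--             return False
--
--     return True
-- ===== SOURCE B (Python) =====
-- def find_valid_substring(code):
--     # Streaming Knuth-Morris-Pratt automaton for the class pattern dd/dd/dddd:
--     # a single left-to-right pass keeping only the automaton state; no window
--     # is ever sliced out or re-examined.
--     pat = "dd/dd/dddd"
--     # Failure table of the pattern's class string (precomputed: classes 'd' and
--     # '/' are disjoint, so class-KMP is exact substring search).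
--     fail = [0, 1, 0, 1, 2, 3, 4, 5, 2, 2]
--
--     def matches(p, c):
--         return c == '/' if p == '/' else c.isdigit()
--
--     q = 0
--     for c in code:
--         while q > 0 and not matches(pat[q], c):
--             q = fail[q - 1]
--         if matches(pat[q], c):
--             q += 1
--             if q == 10:
--                 return True
--     return False
-- ===== Notes on version B (the rewrite author's own statement) =====
-- stated objective: alternative
-- what changed: B replaces A's window scan (slice a 10-char substring at every digit position and validate it) with a streaming KMP automaton over the two character classes digit and slash, keeping a single state integer and a precomputed failure table, so no substring is ever built or re-examined.
import Mathlib
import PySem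

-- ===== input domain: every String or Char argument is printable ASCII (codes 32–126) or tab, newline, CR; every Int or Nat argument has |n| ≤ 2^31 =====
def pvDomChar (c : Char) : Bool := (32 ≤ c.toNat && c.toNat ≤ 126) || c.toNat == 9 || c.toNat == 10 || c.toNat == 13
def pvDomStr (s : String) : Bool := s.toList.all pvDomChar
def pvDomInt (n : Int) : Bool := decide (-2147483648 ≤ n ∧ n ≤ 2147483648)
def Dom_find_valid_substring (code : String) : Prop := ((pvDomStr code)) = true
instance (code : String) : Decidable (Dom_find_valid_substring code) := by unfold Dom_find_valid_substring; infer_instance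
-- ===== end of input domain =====

-- B replaces A's slice-and-validate window scan by a streaming KMP automaton
-- over the character classes digit and slash (one state integer, precomputed
-- failure table); an alternative algorithm of the same asymptotic cost.

-- ===== PORT A =====
def validate_date_format (substring : List Char) : Bool :=
  if substring.length ≠ 10 then false
  else if ¬ (PySem.List.pyGetD substring 2 ' ' = '/') ∨ ¬ (PySem.List.pyGetD substring 5 ' ' = '/') then false
  else
    (PySem.List.pyRange 0 10 1).all (fun i =>
      if i = 2 ∨ i = 5 then true
      else PySem.Chars.isdigit (PySem.List.pyGetD substring i ' '))

def find_valid_substring (code : String) : Bool :=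
  let cs := code.toList
  let length : Int := cs.length
  (PySem.List.pyRange 0 length 1).any (fun i =>
    PySem.Chars.isdigit (PySem.List.pyGetD cs i ' ') &&
    (decide (i + 10 ≤ length) &&
     validate_date_format (PySem.List.slice cs (some i) (some (i + 10)))))

-- ===== PORT B =====
-- pat = "dd/dd/dddd"
def pvPat : List Char := ['d', 'd', '/', 'd', 'd', '/', 'd', 'd', 'd', 'd']
-- fail = [0, 1, 0, 1, 2, 3, 4, 5, 2, 2]
def pvFail : List Nat := [0, 1, 0, 1, 2, 3, 4, 5, 2, 2]
-- def matches(p, c): return c == '/' if p == '/' else c.isdigit()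
def pvMatches (p c : Char) : Bool := if p = '/' then c == '/' else PySem.Chars.isdigit c

-- the 'while q > 0 and not matches(pat[q], c): q = fail[q-1]' loop; the state
-- strictly decreases every iteration, so fuel = the entering state suffices
def pvShrink (c : Char) : Nat → Nat → Nat
  | 0, q => q
  | fuel + 1, q =>
      if 0 < q ∧ pvMatches (pvPat.getD q ' ') c = false then
        pvShrink c fuel (pvFail.getD (q - 1) 0)
      else q

-- one iteration of the 'for c in code' body (without the q == 10 test)
def pvAdvance (c : Char) (q : Nat) : Nat :=
  let q' := pvShrink c q q
  if pvMatches (pvPat.getD q' ' ') c then q' + 1 else q'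

-- the 'for c in code' loop with its early 'return True'
def pvLoop : List Char → Nat → Bool
  | [], _ => false
  | c :: rest, q =>
      let q1 := pvAdvance c q
      if q1 = 10 then true else pvLoop rest q1

def find_valid_substring_alt (code : String) : Bool :=
  pvLoop code.toList 0

-- ===== PRECONDITION & SPEC =====
def Spec_find_valid_substring (code : String) (out : Bool) : Prop := out = find_valid_substring_alt code
instance (code : String) (out : Bool) : Decidable (Spec_find_valid_substring code out) := by unfold Spec_find_valid_substring; infer_instance

-- ===== CLAIM (what is proved, stated in full; the proofs are below) =====
def Claim_equal_find_valid_substring : Prop := ∀ (code : String), Dom_find_valid_substring code → Spec_find_valid_substring code (find_valid_substring code)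

-- ===== LEMMAS AND PROOFS =====

/-- A `dd/dd/dddd` window sits at position `m` of `cs`. -/
def GoodAt (cs : List Char) (m : Nat) : Prop :=
  m + 10 ≤ cs.length ∧ cs.getD (m + 2) ' ' = '/' ∧ cs.getD (m + 5) ' ' = '/' ∧
    PySem.Chars.isdigit (cs.getD (m + 0) ' ') = true ∧
    PySem.Chars.isdigit (cs.getD (m + 1) ' ') = true ∧
    PySem.Chars.isdigit (cs.getD (m + 3) ' ') = true ∧
    PySem.Chars.isdigit (cs.getD (m + 4) ' ') = true ∧
    PySem.Chars.isdigit (cs.getD (m + 6) ' ') = true ∧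
    PySem.Chars.isdigit (cs.getD (m + 7) ' ') = true ∧
    PySem.Chars.isdigit (cs.getD (m + 8) ' ') = true ∧
    PySem.Chars.isdigit (cs.getD (m + 9) ' ') = true

theorem winGetD {α : Type} (cs : List α) (d : α) (m k : Nat) (h : m + 10 ≤ cs.length) (hk : k < 10) :
    ((cs.drop m).take 10).getD k d = cs.getD (m + k) d := by
  rw [List.getD_eq_getElem _ _ (by simp; omega), List.getD_eq_getElem _ _ (by omega)]
  simp [List.getElem_take, List.getElem_drop]

theorem validate_iff (w : List Char) :
    validate_date_format w = true ↔
      (w.length = 10 ∧ w.getD 2 ' ' = '/' ∧ w.getD 5 ' ' = '/' ∧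
       PySem.Chars.isdigit (w.getD 0 ' ') = true ∧ PySem.Chars.isdigit (w.getD 1 ' ') = true ∧
       PySem.Chars.isdigit (w.getD 3 ' ') = true ∧ PySem.Chars.isdigit (w.getD 4 ' ') = true ∧
       PySem.Chars.isdigit (w.getD 6 ' ') = true ∧ PySem.Chars.isdigit (w.getD 7 ' ') = true ∧
       PySem.Chars.isdigit (w.getD 8 ' ') = true ∧ PySem.Chars.isdigit (w.getD 9 ' ') = true) := by
  unfold validate_date_format
  rw [show PySem.List.pyRange 0 10 1 = [0,1,2,3,4,5,6,7,8,9] from by decide]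
  split_ifs with h1 h2
  · simp only [false_iff]
    rintro ⟨hl, -⟩; exact h1 hl
  · rw [show (2:Int) = ((2:Nat):Int) from rfl, show (5:Int) = ((5:Nat):Int) from rfl] at h2
    simp only [PySem.List.pyGetD_natCast] at h2
    simp only [false_iff]
    rintro ⟨-, hs2, hs5, -⟩
    exact h2.elim (fun h => h hs2) (fun h => h hs5)
  · rw [not_not] at h1
    simp only [List.all_cons, List.all_nil]
    rw [if_pos (show True ∨ (2:Int)=5 from Or.inl trivial),
        if_neg (by decide : ¬((3:Int)=2 ∨ (3:Int)=5)),
        if_neg (by decide : ¬((4:Int)=2 ∨ (4:Int)=5)),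
        if_pos (show (5:Int)=2 ∨ True from Or.inr trivial),
        if_neg (by decide : ¬((6:Int)=2 ∨ (6:Int)=5)),
        if_neg (by decide : ¬((7:Int)=2 ∨ (7:Int)=5)),
        if_neg (by decide : ¬((8:Int)=2 ∨ (8:Int)=5)),
        if_neg (by decide : ¬((9:Int)=2 ∨ (9:Int)=5))]
    rw [show (2:Int) = ((2:Nat):Int) from rfl, show (5:Int) = ((5:Nat):Int) from rfl] at h2
    simp only [PySem.List.pyGetD_natCast] at h2
    rw [not_or, not_not, not_not] at h2
    rw [show (0:Int) = ((0:Nat):Int) from rfl, show (1:Int) = ((1:Nat):Int) from rfl,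
        show (3:Int) = ((3:Nat):Int) from rfl, show (4:Int) = ((4:Nat):Int) from rfl,
        show (6:Int) = ((6:Nat):Int) from rfl, show (7:Int) = ((7:Nat):Int) from rfl,
        show (8:Int) = ((8:Nat):Int) from rfl, show (9:Int) = ((9:Nat):Int) from rfl]
    simp only [PySem.List.pyGetD_natCast, Bool.true_and, Bool.and_true, Bool.and_eq_true]
    constructor
    · rintro ⟨d0, d1, d3, d4, d6, d7, d8, d9⟩
      exact ⟨h1, h2.1, h2.2, d0, d1, d3, d4, d6, d7, d8, d9⟩
    · rintro ⟨-, -, -, d0, d1, d3, d4, d6, d7, d8, d9⟩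
      exact ⟨d0, d1, d3, d4, d6, d7, d8, d9⟩

theorem A_iff (code : String) :
    find_valid_substring code = true ↔ ∃ m : Nat, GoodAt code.toList m := by
  unfold find_valid_substring
  simp only [List.any_eq_true, PySem.List.mem_pyRange_one, Bool.and_eq_true, decide_eq_true_eq]
  constructor
  · rintro ⟨i, ⟨h0, hlt⟩, hd, hle, hv⟩
    lift i to Nat using h0 with m
    rw [show ((m:Int)+10) = ((m:Int)+((10:Nat):Int)) from rfl, PySem.List.slice_natCast_add] at hv
    rw [validate_iff] at hv
    have hm10 : m + 10 ≤ code.toList.length := by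
      have := hv.1
      simp only [List.length_take, List.length_drop] at this
      omega
    obtain ⟨-, hs2, hs5, d0, d1, d3, d4, d6, d7, d8, d9⟩ := hv
    rw [winGetD _ _ _ _ hm10 (by omega)] at hs2 hs5
    rw [winGetD _ _ _ _ hm10 (by omega)] at d0
    rw [winGetD _ _ _ _ hm10 (by omega)] at d1
    rw [winGetD _ _ _ _ hm10 (by omega)] at d3
    rw [winGetD _ _ _ _ hm10 (by omega)] at d4
    rw [winGetD _ _ _ _ hm10 (by omega)] at d6
    rw [winGetD _ _ _ _ hm10 (by omega)] at d7
    rw [winGetD _ _ _ _ hm10 (by omega)] at d8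
    rw [winGetD _ _ _ _ hm10 (by omega)] at d9
    exact ⟨m, hm10, hs2, hs5, d0, d1, d3, d4, d6, d7, d8, d9⟩
  · rintro ⟨m, hm10, hs2, hs5, d0, d1, d3, d4, d6, d7, d8, d9⟩
    refine ⟨(m:Int), ⟨by positivity, by exact_mod_cast by omega⟩, ?_, by omega, ?_⟩
    · rw [PySem.List.pyGetD_natCast]
      simpa using d0
    · rw [show ((m:Int)+10) = ((m:Int)+((10:Nat):Int)) from rfl, PySem.List.slice_natCast_add]
      rw [validate_iff]
      refine ⟨by simp only [List.length_take, List.length_drop]; omega, ?_, ?_, ?_, ?_, ?_, ?_, ?_, ?_, ?_, ?_⟩ <;>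
        rw [winGetD _ _ _ _ hm10 (by omega)]
      · exact hs2
      · exact hs5
      · simpa using d0
      · exact d1
      · exact d3
      · exact d4
      · exact d6
      · exact d7
      · exact d8
      · exact d9

-- ===== KMP correctness for port B =====

/-- Character class: '/' ↦ 1, digit ↦ 0, everything else ↦ 2. -/
def sigN (c : Char) : Nat := if c = '/' then 1 else if PySem.Chars.isdigit c then 0 else 2

/-- The pattern's class string. -/
def pvPatC : List Nat := [0, 0, 1, 0, 0, 1, 0, 0, 0, 0]

theorem sigN_mem (c : Char) : sigN c = 0 ∨ sigN c = 1 ∨ sigN c = 2 := by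
  unfold sigN; split_ifs <;> simp

theorem sigN_eq_zero (c : Char) : (sigN c = 0) ↔ PySem.Chars.isdigit c = true := by
  unfold sigN
  split_ifs with h1 h2
  · rw [h1]; decide
  · simp [h2]
  · simp [h2]

theorem sigN_eq_one (c : Char) : (sigN c = 1) ↔ c = '/' := by
  unfold sigN
  split_ifs with h1 h2 <;> simp [h1]

-- class-level versions of the automaton step (the port's step depends on the
-- char only through sigN)
def shrinkC (a : Nat) : Nat → Nat → Nat
  | 0, q => q
  | fuel + 1, q =>
      if 0 < q ∧ (pvPatC.getD q 0 == a) = false then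
        shrinkC a fuel (pvFail.getD (q - 1) 0)
      else q

def advanceC (a : Nat) (q : Nat) : Nat :=
  let q' := shrinkC a q q
  if pvPatC.getD q' 0 == a then q' + 1 else q'

theorem pm_d (c : Char) : pvMatches 'd' c = (0 == sigN c) := by
  unfold pvMatches
  rw [if_neg (by decide)]
  cases h : PySem.Chars.isdigit c with
  | false =>
    have hne : sigN c ≠ 0 := fun hh => by rw [(sigN_eq_zero c).mp hh] at h; cases h
    symm; rw [beq_eq_false_iff_ne]; exact fun hh => hne hh.symm
  | true =>
    rw [(sigN_eq_zero c).mpr h]; rfl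

theorem pm_sp (c : Char) : pvMatches ' ' c = (0 == sigN c) := by
  unfold pvMatches
  rw [if_neg (by decide)]
  cases h : PySem.Chars.isdigit c with
  | false =>
    have hne : sigN c ≠ 0 := fun hh => by rw [(sigN_eq_zero c).mp hh] at h; cases h
    symm; rw [beq_eq_false_iff_ne]; exact fun hh => hne hh.symm
  | true =>
    rw [(sigN_eq_zero c).mpr h]; rfl

theorem pm_s (c : Char) : pvMatches '/' c = (1 == sigN c) := by
  unfold pvMatches
  rw [if_pos rfl]
  by_cases h : c = '/'
  · subst h; decide
  · have h1 : sigN c ≠ 1 := fun hh => h ((sigN_eq_one c).mp hh)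
    rw [show (c == '/') = false from by simp [h],
        show ((1:Nat) == sigN c) = false from by rw [beq_eq_false_iff_ne]; exact fun hh => h1 hh.symm]

theorem match_bridge (q : Nat) (c : Char) :
    pvMatches (pvPat.getD q ' ') c = (pvPatC.getD q 0 == sigN c) := by
  by_cases hq : q < 10
  · interval_cases q <;>
      first
        | exact pm_d c
        | exact pm_s c
  · rw [List.getD_eq_default _ _ (by simp [pvPat]; omega),
        List.getD_eq_default _ _ (by simp [pvPatC]; omega)]
    exact pm_sp c

theorem shrink_bridge (c : Char) (fuel q : Nat) : pvShrink c fuel q = shrinkC (sigN c) fuel q := by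
  induction fuel generalizing q with
  | zero => rfl
  | succ f ih => simp only [pvShrink, shrinkC, match_bridge, ih]

theorem advance_bridge (c : Char) (q : Nat) : pvAdvance c q = advanceC (sigN c) q := by
  unfold pvAdvance advanceC
  simp only [shrink_bridge, match_bridge]

/-- length of the longest prefix of `pvPatC` that is a suffix of `s` (capped at 10). -/
def spLen (s : List Nat) : Nat :=
  (((List.range 11).filter (fun k => decide (pvPatC.take k <:+ s))).max?).getD 0

theorem max_getD_spec (l : List Nat) (h0 : (0 : Nat) ∈ l) :
    l.max?.getD 0 ∈ l ∧ ∀ b ∈ l, b ≤ l.max?.getD 0 := by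
  cases hm : l.max? with
  | none =>
    rw [List.max?_eq_none_iff] at hm
    subst hm; cases h0
  | some m =>
    rw [List.max?_eq_some_iff] at hm
    simpa using hm

theorem zero_mem_filter (s : List Nat) :
    (0 : Nat) ∈ (List.range 11).filter (fun k => decide (pvPatC.take k <:+ s)) := by
  rw [List.mem_filter]
  exact ⟨by simp, by simp [List.nil_suffix]⟩

theorem spLen_le (s : List Nat) : spLen s ≤ 10 := by
  have h := (max_getD_spec _ (zero_mem_filter s)).1
  rw [List.mem_filter, List.mem_range] at h
  have := h.1
  unfold spLen
  omega

theorem spLen_suffix (s : List Nat) : pvPatC.take (spLen s) <:+ s := by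
  have h := (max_getD_spec _ (zero_mem_filter s)).1
  rw [List.mem_filter] at h
  have := h.2
  simpa [spLen] using of_decide_eq_true this

theorem spLen_max (s : List Nat) (k : Nat) (hk : k ≤ 10) (h : pvPatC.take k <:+ s) :
    k ≤ spLen s := by
  have hmem : k ∈ (List.range 11).filter (fun k => decide (pvPatC.take k <:+ s)) := by
    rw [List.mem_filter, List.mem_range]
    exact ⟨by omega, by simpa using h⟩
  exact (max_getD_spec _ (zero_mem_filter s)).2 k hmem

theorem suffix_of_suffix_le {α : Type} (u v s : List α) (hu : u <:+ s) (hv : v <:+ s)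
    (h : u.length ≤ v.length) : u <:+ v := by
  rcases List.suffix_or_suffix_of_suffix hu hv with h1 | h1
  · exact h1
  · have := h1.eq_of_length (le_antisymm h1.length_le h)
    rw [← this]

theorem concat_suffix_concat {α : Type} (u s : List α) (x a : α) :
    (u ++ [x] <:+ s ++ [a]) ↔ (x = a ∧ u <:+ s) := by
  constructor
  · rintro ⟨t, ht⟩
    rw [← List.append_assoc] at ht
    obtain ⟨h1, h2⟩ := List.append_inj' ht (by simp)
    refine ⟨by simpa using h2, t, h1⟩
  · rintro ⟨rfl, t, rfl⟩
    exact ⟨t, by simp⟩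

theorem take_succ_suffix_append (s : List Nat) (a : Nat) (j : Nat) (hj : j < 10) :
    (pvPatC.take (j + 1) <:+ s ++ [a]) ↔ (pvPatC.getD j 0 = a ∧ pvPatC.take j <:+ s) := by
  have hlen : j < pvPatC.length := by simp [pvPatC]; omega
  rw [List.take_add_one, List.getElem?_eq_getElem hlen]
  rw [show (some pvPatC[j]).toList = [pvPatC[j]] from rfl]
  rw [concat_suffix_concat]
  rw [List.getD_eq_getElem _ _ hlen]

/-- the transition function of the class automaton, specified by the prefix-suffix sets. -/
def Tf (q : Nat) (a : Nat) : Nat :=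
  ((((List.range (q + 1)).filter
      (fun j => decide (pvPatC.take j <:+ pvPatC.take q) && (pvPatC.getD j 0 == a))).max?).map
    (· + 1)).getD 0

theorem spLen_append (s : List Nat) (a : Nat) (hq : spLen s ≤ 9) :
    spLen (s ++ [a]) = Tf (spLen s) a := by
  have hqs := spLen_suffix s
  have hq10 := spLen_le s
  apply le_antisymm
  · cases hk : spLen (s ++ [a]) with
    | zero => exact Nat.zero_le _
    | succ j =>
      have hsuf := spLen_suffix (s ++ [a])
      rw [hk] at hsuf
      have hj10 : j < 10 := by have := spLen_le (s ++ [a]); omega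
      rw [take_succ_suffix_append _ _ _ hj10] at hsuf
      obtain ⟨hpj, hsufj⟩ := hsuf
      have hjq : j ≤ spLen s := spLen_max s j (by omega) hsufj
      have htt : pvPatC.take j <:+ pvPatC.take (spLen s) := by
        apply suffix_of_suffix_le _ _ s hsufj hqs
        rw [List.length_take, List.length_take]
        simp [pvPatC]
        omega
      have hmem : j ∈ (List.range (spLen s + 1)).filter
          (fun j => decide (pvPatC.take j <:+ pvPatC.take (spLen s)) && (pvPatC.getD j 0 == a)) := by
        rw [List.mem_filter, List.mem_range]
        refine ⟨by omega, ?_⟩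
        rw [Bool.and_eq_true]
        exact ⟨by simpa using htt, by simpa using hpj⟩
      unfold Tf
      cases hm : ((List.range (spLen s + 1)).filter
          (fun j => decide (pvPatC.take j <:+ pvPatC.take (spLen s)) && (pvPatC.getD j 0 == a))).max? with
      | none =>
        rw [List.max?_eq_none_iff] at hm
        rw [hm] at hmem
        cases hmem
      | some m =>
        simp only [Option.map_some, Option.getD_some]
        rw [List.max?_eq_some_iff] at hm
        have := hm.2 j hmem
        omega
  · unfold Tf
    cases hm : ((List.range (spLen s + 1)).filter
        (fun j => decide (pvPatC.take j <:+ pvPatC.take (spLen s)) && (pvPatC.getD j 0 == a))).max? with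
    | none => simp only [Option.map_none, Option.getD_none]; omega
    | some m =>
      simp only [Option.map_some, Option.getD_some]
      rw [List.max?_eq_some_iff] at hm
      have hmem := hm.1
      rw [List.mem_filter, List.mem_range, Bool.and_eq_true] at hmem
      obtain ⟨hmq, htt, hpa⟩ := hmem
      have hm9 : m < 10 := by omega
      apply spLen_max _ _ (by omega)
      rw [take_succ_suffix_append _ _ _ hm9]
      refine ⟨by simpa using hpa, ?_⟩
      exact (of_decide_eq_true htt).trans hqs

theorem advance_eq_Tf :
    ((List.range 10).all (fun q => ([0, 1, 2] : List Nat).all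
      (fun a => advanceC a q == Tf q a))) = true := by decide

theorem advanceC_eq_Tf (q : Nat) (hq : q ≤ 9) (a : Nat) (ha : a = 0 ∨ a = 1 ∨ a = 2) :
    advanceC a q = Tf q a := by
  have h := advance_eq_Tf
  rw [List.all_eq_true] at h
  have h2 := h q (by rw [List.mem_range]; omega)
  rw [List.all_eq_true] at h2
  have h3 := h2 a (by rcases ha with rfl | rfl | rfl <;> simp)
  exact eq_of_beq h3

theorem step_eq (c : Char) (s : List Nat) (hq : spLen s ≤ 9) :
    pvAdvance c (spLen s) = spLen (s ++ [sigN c]) := by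
  rw [advance_bridge, advanceC_eq_Tf _ hq _ (sigN_mem c), spLen_append _ _ hq]

theorem spLen_nil : spLen ([] : List Nat) = 0 := by decide

theorem pat_take10 : pvPatC.take 10 = pvPatC := by decide

theorem loop_iff (rest : List Char) : ∀ (l : List Char), spLen (l.map sigN) ≤ 9 →
    (pvLoop rest (spLen (l.map sigN)) = true ↔
      ∃ e, l.length < e ∧ e ≤ (l ++ rest).length ∧ pvPatC <:+ ((l ++ rest).map sigN).take e) := by
  induction rest with
  | nil =>
    intro l hq
    simp only [pvLoop, List.append_nil]
    constructor
    · intro h; cases h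
    · rintro ⟨e, h1, h2, hsuf⟩
      have := h2
      omega
  | cons c rest ih =>
    intro l hq
    have hstep : pvAdvance c (spLen (l.map sigN)) = spLen ((l ++ [c]).map sigN) := by
      rw [step_eq c _ hq]
      congr 1
      simp
    have hsplit : l ++ c :: rest = (l ++ [c]) ++ rest := by simp
    have htake : ((l ++ c :: rest).map sigN).take (l.length + 1) = (l ++ [c]).map sigN := by
      rw [hsplit, List.map_append]
      exact List.take_left' (by simp)
    simp only [pvLoop, hstep]
    by_cases h10 : spLen ((l ++ [c]).map sigN) = 10
    · rw [if_pos h10]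
      constructor
      · intro _
        refine ⟨l.length + 1, by omega, by simp, ?_⟩
        rw [htake, ← pat_take10, ← h10]
        exact spLen_suffix _
      · intro _; rfl
    · rw [if_neg h10]
      have hq1 : spLen ((l ++ [c]).map sigN) ≤ 9 := by
        have := spLen_le ((l ++ [c]).map sigN); omega
      rw [ih (l ++ [c]) hq1]
      constructor
      · rintro ⟨e, h1, h2, h3⟩
        rw [← hsplit] at h2 h3
        have h1' : l.length + 1 < e := by simpa using h1
        exact ⟨e, by omega, h2, h3⟩
      · rintro ⟨e, h1, h2, h3⟩
        have hne : e ≠ l.length + 1 := by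
          intro he
          rw [he, htake] at h3
          have := spLen_max ((l ++ [c]).map sigN) 10 (by omega) (by rw [pat_take10]; exact h3)
          omega
        refine ⟨e, ?_, ?_, ?_⟩
        · have : (l ++ [c]).length = l.length + 1 := by simp
          omega
        · rw [← hsplit]; exact h2
        · rw [← hsplit]; exact h3

theorem pat_eq_iff (t : List Nat) (ht : t.length = 10) :
    t = pvPatC ↔ (t.getD 0 0 = 0 ∧ t.getD 1 0 = 0 ∧ t.getD 2 0 = 1 ∧ t.getD 3 0 = 0 ∧
      t.getD 4 0 = 0 ∧ t.getD 5 0 = 1 ∧ t.getD 6 0 = 0 ∧ t.getD 7 0 = 0 ∧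
      t.getD 8 0 = 0 ∧ t.getD 9 0 = 0) := by
  constructor
  · rintro rfl
    exact ⟨rfl, rfl, rfl, rfl, rfl, rfl, rfl, rfl, rfl, rfl⟩
  · rintro ⟨e0, e1, e2, e3, e4, e5, e6, e7, e8, e9⟩
    rw [List.getD_eq_getElem _ _ (by omega)] at e0 e1 e2 e3 e4 e5 e6 e7 e8 e9
    apply List.ext_getElem (by simp [pvPatC, ht])
    intro i h1 h2
    have hi : i < 10 := by omega
    interval_cases i <;> simp_all [pvPatC]

theorem map_getD_sig (cs : List Char) (i : Nat) (hi : i < cs.length) :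
    (cs.map sigN).getD i 0 = sigN (cs.getD i ' ') := by
  rw [List.getD_eq_getElem _ _ (by simpa using hi), List.getD_eq_getElem _ _ hi]
  simp

theorem goodAt_iff (cs : List Char) (m : Nat) :
    GoodAt cs m ↔ (m + 10 ≤ cs.length ∧ pvPatC <:+ ((cs.map sigN).take (m + 10))) := by
  have hmap : (cs.map sigN).length = cs.length := by simp
  constructor
  · rintro ⟨h, hs2, hs5, d0, d1, d3, d4, d6, d7, d8, d9⟩
    refine ⟨h, ?_⟩
    rw [List.suffix_iff_eq_drop]
    have hlt : ((cs.map sigN).take (m + 10)).length = m + 10 := by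
      rw [List.length_take]; omega
    rw [hlt, show m + 10 - pvPatC.length = m from by simp [pvPatC], List.drop_take]
    rw [show m + 10 - m = 10 from by omega]
    symm
    rw [pat_eq_iff _ (by rw [List.length_take, List.length_drop]; omega)]
    refine ⟨?_, ?_, ?_, ?_, ?_, ?_, ?_, ?_, ?_, ?_⟩ <;>
      rw [winGetD _ _ _ _ (by omega : m + 10 ≤ (cs.map sigN).length) (by omega),
          map_getD_sig _ _ (by omega)]
    · exact (sigN_eq_zero _).mpr (by simpa using d0)
    · exact (sigN_eq_zero _).mpr d1
    · exact (sigN_eq_one _).mpr hs2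
    · exact (sigN_eq_zero _).mpr d3
    · exact (sigN_eq_zero _).mpr d4
    · exact (sigN_eq_one _).mpr hs5
    · exact (sigN_eq_zero _).mpr d6
    · exact (sigN_eq_zero _).mpr d7
    · exact (sigN_eq_zero _).mpr d8
    · exact (sigN_eq_zero _).mpr d9
  · rintro ⟨h, hsuf⟩
    rw [List.suffix_iff_eq_drop] at hsuf
    have hlt : ((cs.map sigN).take (m + 10)).length = m + 10 := by
      rw [List.length_take]; omega
    rw [hlt, show m + 10 - pvPatC.length = m from by simp [pvPatC], List.drop_take,
        show m + 10 - m = 10 from by omega] at hsuf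
    rw [eq_comm, pat_eq_iff _ (by rw [List.length_take, List.length_drop]; omega)] at hsuf
    obtain ⟨e0, e1, e2, e3, e4, e5, e6, e7, e8, e9⟩ := hsuf
    rw [winGetD _ _ _ _ (by omega : m + 10 ≤ (cs.map sigN).length) (by omega),
        map_getD_sig _ _ (by omega)] at e0 e1 e2 e3 e4 e5 e6 e7 e8 e9
    refine ⟨h, (sigN_eq_one _).mp e2, (sigN_eq_one _).mp e5, ?_, (sigN_eq_zero _).mp e1,
      (sigN_eq_zero _).mp e3, (sigN_eq_zero _).mp e4, (sigN_eq_zero _).mp e6,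
      (sigN_eq_zero _).mp e7, (sigN_eq_zero _).mp e8, (sigN_eq_zero _).mp e9⟩
    simpa using (sigN_eq_zero _).mp e0

theorem B_iff (code : String) :
    find_valid_substring_alt code = true ↔ ∃ m : Nat, GoodAt code.toList m := by
  unfold find_valid_substring_alt
  have h0 : spLen (([] : List Char).map sigN) = 0 := by rw [List.map_nil, spLen_nil]
  have h := loop_iff code.toList [] (by rw [h0]; omega)
  rw [h0] at h
  simp only [List.nil_append, List.length_nil] at h
  rw [h]
  constructor
  · rintro ⟨e, he0, he1, hsuf⟩
    have h10 : 10 ≤ e := by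
      have hl := hsuf.length_le
      rw [List.length_take] at hl
      simp [pvPatC] at hl
      omega
    refine ⟨e - 10, ?_⟩
    rw [goodAt_iff]
    exact ⟨by omega, by rw [show e - 10 + 10 = e from by omega]; exact hsuf⟩
  · rintro ⟨m, hm⟩
    rw [goodAt_iff] at hm
    exact ⟨m + 10, by omega, by omega, hm.2⟩

-- ===== VERDICT (by name: the statement is the Claim_ definition above) =====
theorem find_valid_substring_spec : Claim_equal_find_valid_substring := by
  intro code _
  unfold Spec_find_valid_substring
  cases hA : find_valid_substring code with
  | true => exact ((B_iff code).mpr ((A_iff code).mp hA)).symm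
  | false =>
    cases hB : find_valid_substring_alt code with
    | true =>
      have h := (A_iff code).mpr ((B_iff code).mp hB)
      rw [hA] at h; exact absurd h (by simp)
    | false => rfl
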